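-- pv_equiv track=rewrite | github.com/giorkala/pgs_calculation_workflow | scripts/make_perturbed_vcf.py | choose_candidate
-- ===== SOURCE A (Python) =====
-- def choose_candidate(rsid: str, gt: str, cands):
--     a1, a2 = gt[0], gt[1]
--     if not cands:
--         return None
--
--     # Priority 1: exact rsID match and genotype-compatible.
--     for cid, ref, alt in cands:
--         if cid == rsid and a1 in {ref, alt} and a2 in {ref, alt}:
--             return cid, ref, alt
--     # Priority 2: genotype-compatible candidate.
--     for cid, ref, alt in cands:
--         if a1 in {ref, alt} and a2 in {ref, alt}:
--             return cid, ref, alt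
--     # Priority 3: rsID match (even if genotype not compatible, usually strand/array issue).
--     for cid, ref, alt in cands:
--         if cid == rsid:
--             return cid, ref, alt
--     return None
-- ===== SOURCE B (Python) =====
-- def choose_candidate(rsid: str, gt: str, cands):
--     a1, a2 = gt[0], gt[1]
--     if not cands:
--         return None
--     best1 = best2 = best3 = None
--     for cand in cands:
--         cid, ref, alt = cand
--         compat = a1 in (ref, alt) and a2 in (ref, alt)
--         if best1 is None and cid == rsid and compat:
--             best1 = cand
--         if best2 is None and compat:
--             best2 = cand
--         if best3 is None and cid == rsid:
--             best3 = cand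
--     return best1 if best1 is not None else best2 if best2 is not None else best3
-- ===== Notes on version B (the rewrite author's own statement) =====
-- stated objective: alternative
-- what changed: Replaces A's three sequential priority scans over the candidate list by a single pass that maintains three first-match slots and picks the highest-priority one afterwards.
import Mathlib
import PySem

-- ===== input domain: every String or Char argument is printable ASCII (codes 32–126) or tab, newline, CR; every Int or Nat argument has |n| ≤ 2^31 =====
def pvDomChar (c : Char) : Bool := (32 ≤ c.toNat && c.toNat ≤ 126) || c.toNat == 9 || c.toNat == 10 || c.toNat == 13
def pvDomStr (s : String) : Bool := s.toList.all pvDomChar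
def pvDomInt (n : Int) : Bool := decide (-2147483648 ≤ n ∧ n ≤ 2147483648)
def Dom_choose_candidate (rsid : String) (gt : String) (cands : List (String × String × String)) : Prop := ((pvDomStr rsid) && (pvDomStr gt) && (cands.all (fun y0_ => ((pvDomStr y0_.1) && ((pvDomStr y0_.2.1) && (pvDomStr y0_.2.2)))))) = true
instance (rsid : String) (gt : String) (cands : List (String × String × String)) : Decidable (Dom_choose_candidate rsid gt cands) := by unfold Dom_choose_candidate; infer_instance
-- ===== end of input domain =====

-- B replaces A's three sequential priority scans by one pass over the candidates that
-- maintains three first-match slots and picks the highest-priority one at the end (alternative decomposition, same cost).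

-- ===== PORT A =====
-- A: genotype letters gt[0], gt[1] (Python 1-char strings, ported as length-1 Strings),
-- then three sequential priority scans. Raises IndexError if len(gt) < 2 (excluded by Pre_).
def ccScan1 (rsid a1 a2 : String) : List (String × String × String) → Option (String × String × String)
  | [] => none
  | (cid, ref, alt) :: rest =>
    if cid == rsid && (a1 == ref || a1 == alt) && (a2 == ref || a2 == alt) then some (cid, ref, alt)
    else ccScan1 rsid a1 a2 rest

def ccScan2 (a1 a2 : String) : List (String × String × String) → Option (String × String × String)
  | [] => none
  | (cid, ref, alt) :: rest =>
    if (a1 == ref || a1 == alt) && (a2 == ref || a2 == alt) then some (cid, ref, alt)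
    else ccScan2 a1 a2 rest

def ccScan3 (rsid : String) : List (String × String × String) → Option (String × String × String)
  | [] => none
  | (cid, ref, alt) :: rest =>
    if cid == rsid then some (cid, ref, alt) else ccScan3 rsid rest

def choose_candidate (rsid : String) (gt : String) (cands : List (String × String × String)) : Option (String × String × String) :=
  match PySem.Str.pyGet? gt 0, PySem.Str.pyGet? gt 1 with
  | some c1, some c2 =>
    let a1 := String.ofList [c1]
    let a2 := String.ofList [c2]
    if cands.isEmpty then none
    else
      match ccScan1 rsid a1 a2 cands with
      | some r => some r
      | none =>
        match ccScan2 a1 a2 cands with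
        | some r => some r
        | none => ccScan3 rsid cands
  | _, _ => none  -- IndexError in Python; outside Pre_

-- ===== PORT B =====
-- B: one pass maintaining three first-match slots (best1/best2/best3), then pick by priority.
def ccStep (rsid a1 a2 : String)
    (st : Option (String × String × String) × Option (String × String × String) × Option (String × String × String))
    (c : String × String × String) :
    Option (String × String × String) × Option (String × String × String) × Option (String × String × String) :=
  let (b1, b2, b3) := st
  let (cid, ref, alt) := c
  let compat := (a1 == ref || a1 == alt) && (a2 == ref || a2 == alt)
  (if b1.isNone && (cid == rsid && compat) then some c else b1,
   if b2.isNone && compat then some c else b2,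
   if b3.isNone && (cid == rsid) then some c else b3)

def choose_candidate_alt (rsid : String) (gt : String) (cands : List (String × String × String)) : Option (String × String × String) :=
  match PySem.Str.pyGet? gt 0 with
  | none => none  -- IndexError in Python; outside Pre_
  | some c1 =>
    match PySem.Str.pyGet? gt 1 with
    | none => none  -- IndexError in Python; outside Pre_
    | some c2 =>
      let a1 := String.ofList [c1]
      let a2 := String.ofList [c2]
      if cands.isEmpty then none
      else
        let (b1, b2, b3) := cands.foldl (ccStep rsid a1 a2) (none, none, none)
        if b1.isSome then b1 else if b2.isSome then b2 else b3

-- ===== PRECONDITION & SPEC =====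
-- Pre_: Python A raises IndexError when gt has fewer than 2 characters (gt[0]/gt[1]); nothing else raises.
def Pre_choose_candidate (rsid : String) (gt : String) (cands : List (String × String × String)) : Prop := 2 ≤ gt.length
instance (rsid : String) (gt : String) (cands : List (String × String × String)) : Decidable (Pre_choose_candidate rsid gt cands) := by unfold Pre_choose_candidate; infer_instance
def pvWitness_choose_candidate : String × String × (List (String × String × String)) := ("rs1", "AG", [("rs2", "T", "C"), ("rs1", "A", "G")])
def Spec_choose_candidate (rsid : String) (gt : String) (cands : List (String × String × String)) (out : Option (String × String × String)) : Prop := out = choose_candidate_alt rsid gt cands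
instance (rsid : String) (gt : String) (cands : List (String × String × String)) (out : Option (String × String × String)) : Decidable (Spec_choose_candidate rsid gt cands out) := by unfold Spec_choose_candidate; infer_instance

-- ===== CLAIM (what is proved, stated in full; the proofs are below) =====
def Claim_equal_choose_candidate : Prop := ∀ (rsid : String) (gt : String) (cands : List (String × String × String)), Dom_choose_candidate rsid gt cands → Pre_choose_candidate rsid gt cands → Spec_choose_candidate rsid gt cands (choose_candidate rsid gt cands)

-- ===== LEMMAS AND PROOFS =====
-- Loop invariant of B's single pass: each slot is its initial value, or else the first match
-- of the corresponding priority scan.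
theorem ccFoldl_eq (rsid a1 a2 : String) (cands : List (String × String × String))
    (b1 b2 b3 : Option (String × String × String)) :
    cands.foldl (ccStep rsid a1 a2) (b1, b2, b3) =
      (b1.orElse (fun _ => ccScan1 rsid a1 a2 cands),
       b2.orElse (fun _ => ccScan2 a1 a2 cands),
       b3.orElse (fun _ => ccScan3 rsid cands)) := by
  induction cands generalizing b1 b2 b3 with
  | nil => cases b1 <;> cases b2 <;> cases b3 <;> rfl
  | cons c rest ih =>
    obtain ⟨cid, ref, alt⟩ := c
    simp only [List.foldl_cons, ccStep, ccScan1, ccScan2, ccScan3]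
    rw [ih]
    cases b1 <;> cases b2 <;> cases b3 <;>
      simp [Option.orElse] <;> split_ifs <;> simp_all

-- ===== VERDICT (by name: the statement is the Claim_ definition above) =====
theorem choose_candidate_spec : Claim_equal_choose_candidate := by
  intro rsid gt cands _ _
  unfold Spec_choose_candidate choose_candidate choose_candidate_alt
  cases PySem.Str.pyGet? gt 0 with
  | none => rfl
  | some c1 =>
    cases PySem.Str.pyGet? gt 1 with
    | none => rfl
    | some c2 =>
      by_cases h : cands.isEmpty
      · simp [h]
      · simp only [h]
        rw [ccFoldl_eq rsid (String.ofList [c1]) (String.ofList [c2]) cands none none none]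
        cases ccScan1 rsid (String.ofList [c1]) (String.ofList [c2]) cands <;>
          cases ccScan2 (String.ofList [c1]) (String.ofList [c2]) cands <;>
          simp [Option.orElse]
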